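-- pv_equiv track=rewrite | github.com/Key-Zzs/lerobot | src/lerobot/policies/act/action_inference_utils.py | _remap_observation_state_feature_names
-- ===== SOURCE A (Python) =====
-- def _remap_observation_state_feature_names(
--     observation_state_feature_names: tuple[str, ...],
--     observation_state_pose_axis_order: tuple[str, ...],
-- ) -> tuple[str, ...]:
--     canonical_pose_axes = ("x", "y", "z", "rx", "ry", "rz")
--     if tuple(observation_state_pose_axis_order) == canonical_pose_axes:
--         return observation_state_feature_names
--     if len(observation_state_pose_axis_order) != len(canonical_pose_axes):
--         raise ValueError(
--             "`observation_state_pose_axis_order` must describe 6 ee-pose axes. "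
--             f"Got {observation_state_pose_axis_order}."
--         )
--
--     stored_axis_to_semantic_axis = {
--         stored_axis: semantic_axis
--         for semantic_axis, stored_axis in zip(canonical_pose_axes, observation_state_pose_axis_order, strict=True)
--     }
--     remapped_names: list[str] = []
--     for feature_name in observation_state_feature_names:
--         for stored_axis, semantic_axis in stored_axis_to_semantic_axis.items():
--             suffix = f".{stored_axis}"
--             if feature_name.endswith(suffix):
--                 remapped_names.append(feature_name[: -len(suffix)] + f".{semantic_axis}")
--                 break
--         else:
--             remapped_names.append(feature_name)
--
--     return tuple(remapped_names)
-- ===== SOURCE B (Python) =====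
-- def _remap_observation_state_feature_names(
--     observation_state_feature_names,
--     observation_state_pose_axis_order,
-- ):
--     canonical_pose_axes = ("x", "y", "z", "rx", "ry", "rz")
--     if tuple(observation_state_pose_axis_order) == canonical_pose_axes:
--         return observation_state_feature_names
--     if len(observation_state_pose_axis_order) != len(canonical_pose_axes):
--         raise ValueError(
--             "`observation_state_pose_axis_order` must describe 6 ee-pose axes. "
--             f"Got {observation_state_pose_axis_order}."
--         )
--     stored_axis_to_semantic_axis = {
--         stored_axis: semantic_axis
--         for semantic_axis, stored_axis in zip(canonical_pose_axes, observation_state_pose_axis_order, strict=True)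
--     }
--     # axis-major: one pass over the names per stored axis; a name is remapped by the
--     # first axis pass that hits it (results[i] marks it done)
--     results = [None] * len(observation_state_feature_names)
--     for stored_axis, semantic_axis in stored_axis_to_semantic_axis.items():
--         suffix = f".{stored_axis}"
--         for i, feature_name in enumerate(observation_state_feature_names):
--             if results[i] is None and feature_name.endswith(suffix):
--                 results[i] = feature_name[: -len(suffix)] + f".{semantic_axis}"
--     return tuple(
--         r if r is not None else feature_name
--         for r, feature_name in zip(results, observation_state_feature_names)
--     )
-- ===== Notes on version B (the rewrite author's own statement) =====
-- stated objective: alternative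
-- what changed: Loop interchange: instead of A's per-name inner scan over the six axis suffixes with break/for-else, B makes one axis-major pass over the names per stored axis, marking each name done in a results mask the first time an axis pass hits it.
import Mathlib
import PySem

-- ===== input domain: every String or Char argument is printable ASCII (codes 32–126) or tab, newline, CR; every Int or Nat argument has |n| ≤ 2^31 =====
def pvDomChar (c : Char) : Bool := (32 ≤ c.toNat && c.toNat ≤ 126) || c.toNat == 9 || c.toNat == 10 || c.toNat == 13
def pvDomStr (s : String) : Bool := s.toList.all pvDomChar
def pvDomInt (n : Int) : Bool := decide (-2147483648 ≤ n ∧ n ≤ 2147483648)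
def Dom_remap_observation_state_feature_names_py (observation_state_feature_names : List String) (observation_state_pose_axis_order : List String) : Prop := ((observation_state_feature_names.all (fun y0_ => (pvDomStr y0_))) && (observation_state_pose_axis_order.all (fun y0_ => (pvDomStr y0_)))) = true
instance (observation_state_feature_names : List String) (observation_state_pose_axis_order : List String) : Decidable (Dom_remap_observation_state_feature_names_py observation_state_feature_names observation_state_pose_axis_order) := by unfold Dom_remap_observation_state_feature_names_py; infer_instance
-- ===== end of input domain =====

-- B is a loop interchange of A: one axis-major pass over the names per stored axis with a
-- done-mask, instead of A's per-name scan over the six suffixes (alternative; same cost).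


-- ===== PORT A =====
-- canonical_pose_axes = ("x", "y", "z", "rx", "ry", "rz")
def pvCanonical : List String := ["x", "y", "z", "rx", "ry", "rz"]

-- the dict comprehension {stored: semantic for semantic, stored in zip(canonical, order)}
-- (the identical line occurs in A and in B, so shared; Dict.insert overwrites like Python)
def pvMkDict (order : List String) : PySem.Dict (List Char) (List Char) :=
  (pvCanonical.zip order).foldl (fun d p => d.insert p.2.toList p.1.toList) PySem.Dict.empty

-- A's inner 'for stored_axis, semantic_axis in dict.items(): … break / else: …' over one
-- name, on code points (exact: String.ofList/toList round-trips; f".{ax}" is '.' :: ax)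
def pvInnerA (nm : List Char) : List (List Char × List Char) → List Char
  | [] => nm
  | (st, sem) :: rest =>
    if PySem.Chars.endswith nm ('.' :: st) then
      -- feature_name[: -len(suffix)] + f".{semantic_axis}"
      PySem.List.slice nm none (some (-((('.' :: st).length : Nat) : Int))) ++ '.' :: sem
    else pvInnerA nm rest

def remap_observation_state_feature_names_py (observation_state_feature_names : List String) (observation_state_pose_axis_order : List String) : List String :=
  if observation_state_pose_axis_order = pvCanonical then observation_state_feature_names
  else if observation_state_pose_axis_order.length ≠ 6 then []  -- Python raises ValueError here (outside Pre_)
  else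
    let d := pvMkDict observation_state_pose_axis_order
    observation_state_feature_names.map (fun nm => String.ofList (pvInnerA nm.toList d.items))

-- ===== PORT B =====
-- B's inner 'for i, feature_name in enumerate(names): if results[i] is None and
-- feature_name.endswith(suffix): results[i] = …' for ONE axis (st, sem): entries are
-- (feature_name, results[i]) pairs, and the pass over them is a map
def pvStepB (it : List Char × List Char) (e : List Char × Option (List Char)) :
    List Char × Option (List Char) :=
  match e with
  | (o, none) =>
    if PySem.Chars.endswith o ('.' :: it.1) then
      (o, some (PySem.List.slice o none (some (-((('.' :: it.1).length : Nat) : Int))) ++ '.' :: it.2))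
    else (o, none)
  | (o, some r) => (o, some r)

def remap_observation_state_feature_names_py_alt (observation_state_feature_names : List String) (observation_state_pose_axis_order : List String) : List String :=
  if observation_state_pose_axis_order = pvCanonical then observation_state_feature_names
  else if observation_state_pose_axis_order.length ≠ 6 then []  -- same ValueError in Source B (outside Pre_)
  else
    let d := pvMkDict observation_state_pose_axis_order
    -- results = [None] * len(names), zipped with the names
    let init := observation_state_feature_names.map (fun nm => (nm.toList, (none : Option (List Char))))
    -- for stored_axis, semantic_axis in dict.items(): one pass over all entries
    let fin := d.items.foldl (fun stt it => stt.map (pvStepB it)) init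
    -- r if r is not None else feature_name
    fin.map (fun e => String.ofList (e.2.getD e.1))

-- ===== PRECONDITION & SPEC =====
-- Pre_ excludes exactly the inputs on which A raises ValueError: a non-canonical axis
-- order whose length is not 6 (Source B raises there too).
def Pre_remap_observation_state_feature_names_py (observation_state_feature_names : List String) (observation_state_pose_axis_order : List String) : Prop :=
  observation_state_pose_axis_order = pvCanonical ∨ observation_state_pose_axis_order.length = 6
instance (observation_state_feature_names : List String) (observation_state_pose_axis_order : List String) : Decidable (Pre_remap_observation_state_feature_names_py observation_state_feature_names observation_state_pose_axis_order) := by unfold Pre_remap_observation_state_feature_names_py; infer_instance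

def pvWitness_remap_observation_state_feature_names_py : List String × List String :=
  (["ee.a", "gripper", "ee.b"], ["a", "b", "c", "d", "e", "f"])

def Spec_remap_observation_state_feature_names_py (observation_state_feature_names : List String) (observation_state_pose_axis_order : List String) (out : List String) : Prop := out = remap_observation_state_feature_names_py_alt observation_state_feature_names observation_state_pose_axis_order
instance (observation_state_feature_names : List String) (observation_state_pose_axis_order : List String) (out : List String) : Decidable (Spec_remap_observation_state_feature_names_py observation_state_feature_names observation_state_pose_axis_order out) := by unfold Spec_remap_observation_state_feature_names_py; infer_instance

-- ===== CLAIM (what is proved, stated in full; the proofs are below) =====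
def Claim_equal_remap_observation_state_feature_names_py : Prop := ∀ (observation_state_feature_names : List String) (observation_state_pose_axis_order : List String), Dom_remap_observation_state_feature_names_py observation_state_feature_names observation_state_pose_axis_order → Pre_remap_observation_state_feature_names_py observation_state_feature_names observation_state_pose_axis_order → Spec_remap_observation_state_feature_names_py observation_state_feature_names observation_state_pose_axis_order (remap_observation_state_feature_names_py observation_state_feature_names observation_state_pose_axis_order)

-- ===== LEMMAS AND PROOFS =====

-- a fold of per-entry maps over a mapped initial state is the map of the per-entry folds
theorem pv_foldl_map {α β : Type} (items : List (List Char × List Char))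
    (xs : List α) (g : α → β) (step : (List Char × List Char) → β → β) :
    items.foldl (fun stt it => stt.map (step it)) (xs.map g) =
      xs.map (fun x => items.foldl (fun e it => step it e) (g x)) := by
  induction items generalizing g with
  | nil => simp
  | cons it rest ih =>
    simp only [List.foldl_cons, List.map_map]
    exact ih (fun x => step it (g x)) 

-- a done entry is never touched again
theorem pv_foldl_step_some (items : List (List Char × List Char)) (o r : List Char) :
    items.foldl (fun e it => pvStepB it e) (o, some r) = (o, some r) := by
  induction items with
  | nil => rfl
  | cons it rest ih => simpa [pvStepB] using ih

-- pointwise, B's axis-major passes compute exactly A's first-match inner loop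
theorem pv_pointwise (items : List (List Char × List Char)) (o : List Char) :
    (items.foldl (fun e it => pvStepB it e) (o, none)).2.getD
        (items.foldl (fun e it => pvStepB it e) (o, none)).1 = pvInnerA o items := by
  induction items with
  | nil => rfl
  | cons it rest ih =>
    obtain ⟨st, sem⟩ := it
    by_cases hew : PySem.Chars.endswith o ('.' :: st) = true
    · rw [List.foldl_cons,
        show pvStepB (st, sem) (o, none) =
          (o, some (PySem.List.slice o none
            (some (-((('.' :: st).length : Nat) : Int))) ++ '.' :: sem)) from by
              simp [pvStepB, hew],
        pv_foldl_step_some]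
      unfold pvInnerA
      rw [if_pos hew]
      rfl
    · rw [List.foldl_cons,
        show pvStepB (st, sem) (o, none) = (o, none) from by simp [pvStepB, hew]]
      unfold pvInnerA
      rw [if_neg hew]
      exact ih

-- ===== VERDICT (by name: the statement is the Claim_ definition above) =====
theorem remap_observation_state_feature_names_py_spec : Claim_equal_remap_observation_state_feature_names_py := by
  intro names order hdom hpre
  unfold Spec_remap_observation_state_feature_names_py
  by_cases hc : order = pvCanonical
  · simp [remap_observation_state_feature_names_py,
      remap_observation_state_feature_names_py_alt, hc]
  · rcases hpre with h | hlen
    · exact absurd h hc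
    unfold remap_observation_state_feature_names_py
      remap_observation_state_feature_names_py_alt
    rw [if_neg hc, if_neg hc]
    rw [if_neg (by simp [hlen]), if_neg (by simp [hlen])]
    simp only [pv_foldl_map, List.map_map]
    refine List.map_congr_left ?_
    intro nm _
    simp only [Function.comp]
    exact congrArg String.ofList (pv_pointwise (pvMkDict order).items nm.toList).symm
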